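-- pv_equiv track=rewrite | github.com/runexperiment/MLCCI-Experiment | Tool_io.py | compare_sus
-- ===== SOURCE A (Python) =====
-- def compare_sus(a, b):
--     x = list(a.keys())
--     y = list(b.keys())
--     for index in y:
--         if index not in x:
--             b.pop(index)
--     for index in x:
--         if index in y:
--             a.pop(index)
--     return a, b
-- ===== SOURCE B (Python) =====
-- def compare_sus(a, b):
--     # Different strategy: instead of deleting keys from the inputs in place,
--     # rebuild both results as fresh filtered dicts (construction, not deletion).
--     # Note: unlike A, B does not mutate its arguments.
--     new_b = {k: v for k, v in b.items() if k in a}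
--     new_a = {k: v for k, v in a.items() if k not in b}
--     return new_a, new_b
-- ===== Notes on version B (the rewrite author's own statement) =====
-- stated objective: faster
-- what changed: B does not delete anything: it rebuilds the two results as fresh filtered dict comprehensions (a's keys not in b, b's keys in a), whereas A mutates the inputs by popping keys inside membership-test loops; B leaves the arguments unmutated.
import Mathlib
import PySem

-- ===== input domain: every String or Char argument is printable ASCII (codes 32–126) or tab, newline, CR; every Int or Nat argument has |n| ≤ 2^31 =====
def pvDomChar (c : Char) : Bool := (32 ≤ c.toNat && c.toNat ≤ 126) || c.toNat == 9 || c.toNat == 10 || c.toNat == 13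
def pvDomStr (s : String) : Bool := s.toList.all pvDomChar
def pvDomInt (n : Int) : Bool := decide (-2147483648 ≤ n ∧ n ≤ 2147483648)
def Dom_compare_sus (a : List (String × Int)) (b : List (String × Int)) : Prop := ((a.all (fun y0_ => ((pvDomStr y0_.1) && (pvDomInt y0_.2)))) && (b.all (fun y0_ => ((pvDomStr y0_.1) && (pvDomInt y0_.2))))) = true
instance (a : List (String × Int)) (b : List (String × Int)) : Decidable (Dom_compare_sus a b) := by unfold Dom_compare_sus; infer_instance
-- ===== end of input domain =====

-- ===== PORT A =====
-- B rebuilds the results as fresh filtered dicts instead of deleting keys from the inputs;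
-- A mutates its arguments (pop), B does not — the equivalence proved here is about the return value.
-- A: x = list(a.keys()); y = list(b.keys()); for index in y: if index not in x: b.pop(index);
--    for index in x: if index in y: a.pop(index); return a, b
-- (b.pop(index) always finds its key here — index ∈ y = b's original distinct keys and only other
--  keys have been removed — so its effect on the dict is exactly erase.)
def compare_sus (a : List (String × Int)) (b : List (String × Int)) : (List (String × Int)) × (List (String × Int)) :=
  let da := PySem.Dict.ofList a
  let db := PySem.Dict.ofList b
  let x := da.keys
  let y := db.keys
  let db2 := y.foldl (fun d index => if x.contains index then d else d.erase index) db
  let da2 := x.foldl (fun d index => if y.contains index then d.erase index else d) da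
  (da2.items, db2.items)

-- ===== PORT B =====
-- B: new_b = {k: v for k, v in b.items() if k in a}; new_a = {k: v for k, v in a.items() if k not in b};
--    return new_a, new_b
-- (a dict comprehension over a dict's items with distinct keys is, under the assoc-list convention,
--  exactly the filtered item list; 'k in a' is key membership)
def compare_sus_alt (a : List (String × Int)) (b : List (String × Int)) : (List (String × Int)) × (List (String × Int)) :=
  let da := PySem.Dict.ofList a
  let db := PySem.Dict.ofList b
  let newB := db.items.filter (fun p => da.keys.contains p.1)
  let newA := da.items.filter (fun p => !(db.keys.contains p.1))
  (newA, newB)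

-- ===== PRECONDITION & SPEC =====
def Spec_compare_sus (a : List (String × Int)) (b : List (String × Int)) (out : (List (String × Int)) × (List (String × Int))) : Prop := out = compare_sus_alt a b
instance (a : List (String × Int)) (b : List (String × Int)) (out : (List (String × Int)) × (List (String × Int))) : Decidable (Spec_compare_sus a b out) := by unfold Spec_compare_sus; infer_instance

-- ===== CLAIM =====
def Claim_equal_compare_sus : Prop := ∀ (a : List (String × Int)) (b : List (String × Int)), Dom_compare_sus a b → Spec_compare_sus a b (compare_sus a b)

-- ===== LEMMAS AND PROOFS =====

-- A's conditional-erase loop (erase unless c) leaves the items whose key satisfies c or lies outside the loop list.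
theorem items_foldl_erase_unless (c : String → Bool) (L : List String) (d : PySem.Dict String Int) :
    (L.foldl (fun d k => if c k then d else d.erase k) d).items
      = d.items.filter (fun p => c p.1 || !L.contains p.1) := by
  induction L generalizing d with
  | nil => simp
  | cons k L ih =>
      simp only [List.foldl_cons]
      by_cases hc : c k
      · rw [if_pos hc, ih]
        apply List.filter_congr
        intro p _
        by_cases h : p.1 = k <;> simp [h, hc]
      · rw [if_neg hc, ih]
        simp only [PySem.Dict.erase, List.filter_filter]
        apply List.filter_congr
        intro p _
        by_cases h : p.1 = k <;> simp [h, hc]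

-- Same, with the branch the other way round (erase when c holds).
theorem items_foldl_erase_when (c : String → Bool) (L : List String) (d : PySem.Dict String Int) :
    (L.foldl (fun d k => if c k then d.erase k else d) d).items
      = d.items.filter (fun p => !c p.1 || !L.contains p.1) := by
  induction L generalizing d with
  | nil => simp
  | cons k L ih =>
      simp only [List.foldl_cons]
      by_cases hc : c k
      · rw [if_pos hc, ih]
        simp only [PySem.Dict.erase, List.filter_filter]
        apply List.filter_congr
        intro p _
        by_cases h : p.1 = k <;> simp [h, hc]
      · rw [if_neg hc, ih]
        apply List.filter_congr
        intro p _
        by_cases h : p.1 = k <;> simp [h, hc]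

-- ===== VERDICT =====
theorem compare_sus_spec : Claim_equal_compare_sus := by
  intro a b _
  unfold Spec_compare_sus compare_sus compare_sus_alt
  simp only [items_foldl_erase_unless, items_foldl_erase_when]
  refine Prod.ext ?_ ?_
  · apply List.filter_congr
    intro p hp
    have hk : p.1 ∈ (PySem.Dict.ofList a).keys := PySem.Dict.mem_keys_of_mem_items _ hp
    simp [hk]
  · apply List.filter_congr
    intro p hp
    have hk : p.1 ∈ (PySem.Dict.ofList b).keys := PySem.Dict.mem_keys_of_mem_items _ hp
    simp [hk]
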